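-- pv_equiv track=rewrite | github.com/StevenXoFk/Tarea-taller-Tkinter | convertidor.py | base10_a_base5
-- ===== SOURCE A (Python) =====
-- def base10_a_base5(numero):
--     decimal = 0
--     exponente = 0
--
--     while numero > 0:
--         digitos = numero % 10
--         decimal += digitos * (10 ** exponente)
--         numero //= 10
--         exponente += 1
--
--     binario = 0
--     valor = 1
--     while decimal > 0:
--         todo = decimal % 5
--         binario += todo * valor
--         decimal //= 5
--         valor *= 10
--
--     return binario
-- ===== SOURCE B (Python) =====
-- def to5(n):
--     if n <= 0:
--         return 0
--     return to5(n // 5) * 10 + n % 5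
--
-- def base10_a_base5(numero):
--     return to5(numero)
-- ===== Notes on version B (the rewrite author's own statement) =====
-- stated objective: simpler
-- what changed: Replaces A's two while-loops (the first only reconstructs the number digit by digit, an identity for positive inputs) with one short recursion that peels off the lowest base-five digit each step and assembles the digits at decimal positions.
import Mathlib
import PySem

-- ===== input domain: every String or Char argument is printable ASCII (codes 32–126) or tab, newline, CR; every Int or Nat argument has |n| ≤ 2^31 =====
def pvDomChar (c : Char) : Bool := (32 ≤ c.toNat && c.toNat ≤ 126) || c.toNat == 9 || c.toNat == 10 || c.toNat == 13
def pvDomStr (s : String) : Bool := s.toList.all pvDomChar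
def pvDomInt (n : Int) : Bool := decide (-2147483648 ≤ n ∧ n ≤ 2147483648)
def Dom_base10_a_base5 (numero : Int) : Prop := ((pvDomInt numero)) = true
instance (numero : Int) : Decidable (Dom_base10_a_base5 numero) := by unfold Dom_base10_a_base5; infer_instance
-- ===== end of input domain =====

-- B replaces A's two while-loops (the first is an identity reconstruction) with one direct recursion over n // 5; objective: simpler.

-- ===== PORT A =====
-- first while-loop of A: reconstructs the decimal digits of `numero`
def pvLoop1 (numero decimal exponente : Int) : Int :=
  if 0 < numero then
    pvLoop1 (PySem.Int.floordiv numero 10)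
            (decimal + PySem.Int.mod numero 10 * 10 ^ exponente.toNat)
            (exponente + 1)
  else decimal
termination_by numero.toNat
decreasing_by
  have h := PySem.Int.floordiv_eq_ediv_of_pos (a := numero) (b := 10) (by omega)
  rw [h]; omega

-- second while-loop of A: emits base-5 digits at decimal positions
def pvLoop2 (decimal binario valor : Int) : Int :=
  if 0 < decimal then
    pvLoop2 (PySem.Int.floordiv decimal 5)
            (binario + PySem.Int.mod decimal 5 * valor)
            (valor * 10)
  else binario
termination_by decimal.toNat
decreasing_by
  have h := PySem.Int.floordiv_eq_ediv_of_pos (a := decimal) (b := 5) (by omega)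
  rw [h]; omega

def base10_a_base5 (numero : Int) : Int :=
  pvLoop2 (pvLoop1 numero 0 0) 0 1

-- ===== PORT B =====
def pvTo5 (n : Int) : Int :=
  if n ≤ 0 then 0
  else pvTo5 (PySem.Int.floordiv n 5) * 10 + PySem.Int.mod n 5
termination_by n.toNat
decreasing_by
  have h := PySem.Int.floordiv_eq_ediv_of_pos (a := n) (b := 5) (by omega)
  rw [h]; omega

def base10_a_base5_alt (numero : Int) : Int := pvTo5 numero

-- ===== PRECONDITION & SPEC =====
def Spec_base10_a_base5 (numero : Int) (out : Int) : Prop := out = base10_a_base5_alt numero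
instance (numero : Int) (out : Int) : Decidable (Spec_base10_a_base5 numero out) := by unfold Spec_base10_a_base5; infer_instance

-- ===== CLAIM (what is proved, stated in full; the proofs are below) =====
def Claim_equal_base10_a_base5 : Prop := ∀ (numero : Int), Dom_base10_a_base5 numero → Spec_base10_a_base5 numero (base10_a_base5 numero)

-- ===== LEMMAS AND PROOFS =====

-- A's first loop computes decimal + numero * 10 ^ exponente (for nonnegative exponente)
theorem pvLoop1_eq (numero decimal exponente : Int) (he : 0 ≤ exponente) :
    pvLoop1 numero decimal exponente =
      if 0 < numero then decimal + numero * 10 ^ exponente.toNat else decimal := by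
  induction numero, decimal, exponente using pvLoop1.induct with
  | case1 n d e hpos ih =>
    rw [pvLoop1, if_pos hpos, if_pos hpos,
        ih (by omega),
        PySem.Int.floordiv_eq_ediv_of_pos (a := n) (b := 10) (by omega),
        PySem.Int.mod_eq_emod_of_pos (a := n) (b := 10) (by omega)]
    have het : (e + 1).toNat = e.toNat + 1 := by omega
    split_ifs with h2
    · rw [het, pow_succ]
      have hdm : n % 10 + n / 10 * 10 = n := by omega
      linear_combination (10 : Int) ^ e.toNat * hdm
    · have hm : n % 10 = n := by omega
      linear_combination (10 : Int) ^ e.toNat * hm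
  | case2 n d e hpos => rw [pvLoop1, if_neg hpos, if_neg hpos]

-- A's second loop equals binario + (B's conversion of decimal) * valor
theorem pvLoop2_eq (decimal binario valor : Int) :
    pvLoop2 decimal binario valor = binario + pvTo5 decimal * valor := by
  induction decimal, binario, valor using pvLoop2.induct with
  | case1 d b v hpos ih =>
    have hd : pvTo5 d = pvTo5 (PySem.Int.floordiv d 5) * 10 + PySem.Int.mod d 5 := by
      rw [pvTo5]; exact if_neg (by omega)
    rw [pvLoop2, if_pos hpos, ih, hd]; ring
  | case2 d b v hpos =>
    have hd : pvTo5 d = 0 := by rw [pvTo5]; exact if_pos (by omega)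
    rw [pvLoop2, if_neg hpos, hd]; ring

-- ===== VERDICT (by name: the statement is the Claim_ definition above) =====
theorem base10_a_base5_spec : Claim_equal_base10_a_base5 := by
  intro numero _
  show base10_a_base5 numero = base10_a_base5_alt numero
  unfold base10_a_base5 base10_a_base5_alt
  rw [pvLoop1_eq numero 0 0 le_rfl, pvLoop2_eq]
  split_ifs with h
  · simp
  · have h0 : pvTo5 0 = 0 := by rw [pvTo5]; exact if_pos (by omega)
    have hn : pvTo5 numero = 0 := by rw [pvTo5]; exact if_pos (by omega)
    rw [h0, hn]; ring
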